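-- pv_equiv track=rewrite | github.com/antilneeraj/GFG-POTD | 31_03_2023_EvenSwap.py | lexicographicallyLargest
-- ===== SOURCE A (Python) =====
-- def lexicographicallyLargest(a, n):
--     i = 0
--
--     while i < n:
--         j = i + 1
--         while j < n and a[j] % 2 == a[j - 1] % 2:
--             j += 1
--
--         a[i:j] = sorted(a[i:j], reverse=True)
--         i = j
--
--     return a
-- ===== SOURCE B (Python) =====
-- def lexicographicallyLargest(a, n):
--     k = max(n, 0)
--     groups = []
--     for x in reversed(a[:k]):
--         if groups and groups[0][0] % 2 == x % 2:
--             g = groups[0]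
--             j = 0
--             while j < len(g) and g[j] >= x:
--                 j += 1
--             g.insert(j, x)
--         else:
--             groups.insert(0, [x])
--     a[:k] = [v for g in groups for v in g]
--     return a
-- ===== Notes on version B (the rewrite author's own statement) =====
-- stated objective: alternative
-- what changed: Instead of locating run boundaries by index and calling sorted() on each slice, B makes a single backward pass that maintains a list of parity groups and places each element by insertion into the current group's descending position, then flattens the groups back into a; no sort call and no boundary scan.
import Mathlib
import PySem

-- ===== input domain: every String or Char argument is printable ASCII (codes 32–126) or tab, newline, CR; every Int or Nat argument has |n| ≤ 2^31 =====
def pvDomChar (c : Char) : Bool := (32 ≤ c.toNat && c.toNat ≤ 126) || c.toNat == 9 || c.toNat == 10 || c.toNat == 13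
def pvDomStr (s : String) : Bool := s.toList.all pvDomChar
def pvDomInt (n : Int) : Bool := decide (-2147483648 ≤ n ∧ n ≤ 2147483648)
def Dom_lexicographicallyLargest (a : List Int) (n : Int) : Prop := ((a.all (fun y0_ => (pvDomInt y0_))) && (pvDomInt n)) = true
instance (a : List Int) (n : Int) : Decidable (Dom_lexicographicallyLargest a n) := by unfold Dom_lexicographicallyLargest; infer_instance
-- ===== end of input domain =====

-- B replaces A's index-based double-while run segmentation with slice sorts by a single backward
-- pass that maintains parity groups and places each element by insertion (no sort call); the
-- equivalence is about the returned list (both Pythons mutate `a` in place to the same contents).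


-- ===== PORT A =====
-- inner `while j < n and a[j] % 2 == a[j-1] % 2: j += 1` (indices are in range under Pre_);
-- fuel bounds the loop: j increases towards n, so (n-j).toNat steps suffice
def pvRunEndA (a : List Int) (n : Int) (j : Int) (fuel : Nat) : Int :=
  match fuel with
  | 0 => j
  | f + 1 =>
    if j < n ∧ PySem.Int.mod (PySem.List.pyGetD a j 0) 2 = PySem.Int.mod (PySem.List.pyGetD a (j - 1) 0) 2
    then pvRunEndA a n (j + 1) f
    else j

-- outer `while i < n:` loop; `a[i:j] = sorted(a[i:j], reverse=True)` is the slice assignment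
-- a[:i] ++ sorted(a[i:j], reverse=True) ++ a[j:]; i jumps to j ≥ i+1, so n.toNat steps of fuel suffice
def pvOuterA (a : List Int) (n : Int) (i : Int) (fuel : Nat) : List Int :=
  match fuel with
  | 0 => a
  | f + 1 =>
    if i < n then
      let j := pvRunEndA a n (i + 1) ((n - i).toNat)
      let a' := PySem.List.slice a none (some i)
        ++ PySem.List.sorted (PySem.List.slice a (some i) (some j)) (fun x => x) true
        ++ PySem.List.slice a (some j) none
      pvOuterA a' n j f
    else a

def lexicographicallyLargest (a : List Int) (n : Int) : List Int :=
  pvOuterA a n 0 n.toNat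

-- ===== PORT B =====
-- inner `j = 0; while j < len(g) and g[j] >= x: j += 1; g.insert(j, x)` — walk past the
-- elements ≥ x, then insert x (exact: the while/insert pair is this structural recursion)
def pvInsertDesc (g : List Int) (x : Int) : List Int :=
  match g with
  | [] => [x]
  | y :: ys => if y ≥ x then y :: pvInsertDesc ys x else x :: y :: ys

-- loop body: join the front group when `groups and groups[0][0] % 2 == x % 2`, else open a new one
def pvStepB (x : Int) (groups : List (List Int)) : List (List Int) :=
  match groups with
  | [] => [[x]]
  | g :: gs =>
    if PySem.Int.mod (PySem.List.pyGetD g 0 0) 2 = PySem.Int.mod x 2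
    then pvInsertDesc g x :: gs
    else [x] :: g :: gs

-- `for x in reversed(a[:k])` processes the slice right-to-left = a foldr over it;
-- `a[:k] = [v for g in groups for v in g]` is flatten ++ the untouched tail
def lexicographicallyLargest_alt (a : List Int) (n : Int) : List Int :=
  let k := max n 0
  let groups := (PySem.List.slice a none (some k)).foldr pvStepB []
  groups.flatten ++ PySem.List.slice a (some k) none

-- ===== PRECONDITION & SPEC =====
-- Pre_ excludes exactly the inputs on which A raises IndexError (n exceeding len(a)); the second
-- disjunct keeps the one degenerate n-exceeding-length input where A still returns normally
-- because the inner comparison is never reached.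
def Pre_lexicographicallyLargest (a : List Int) (n : Int) : Prop :=
  n ≤ (a.length : Int) ∨ (a = [] ∧ n = 1)
instance (a : List Int) (n : Int) : Decidable (Pre_lexicographicallyLargest a n) := by
  unfold Pre_lexicographicallyLargest; infer_instance

def pvWitness_lexicographicallyLargest : List Int × Int := ([5, 7, 2, 4, 3], 5)

def Spec_lexicographicallyLargest (a : List Int) (n : Int) (out : List Int) : Prop := out = lexicographicallyLargest_alt a n
instance (a : List Int) (n : Int) (out : List Int) : Decidable (Spec_lexicographicallyLargest a n out) := by unfold Spec_lexicographicallyLargest; infer_instance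

-- ===== CLAIM (what is proved, stated in full; the proofs are below) =====
def Claim_equal_lexicographicallyLargest : Prop := ∀ (a : List Int) (n : Int), Dom_lexicographicallyLargest a n → Pre_lexicographicallyLargest a n → Spec_lexicographicallyLargest a n (lexicographicallyLargest a n)

-- ===== LEMMAS AND PROOFS =====

lemma pvMod2 (z : Int) : PySem.Int.mod z 2 = z % 2 :=
  PySem.Int.mod_eq_emod_of_pos (by norm_num)

lemma pvGetD_app0 (pre : List Int) (z : Int) (zs : List Int) (d : Int) :
    PySem.List.pyGetD (pre ++ z :: zs) (pre.length : Int) d = z := by simp [pysem]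

lemma pvGetD_app1 (pre : List Int) (c z : Int) (zs : List Int) (d : Int) :
    PySem.List.pyGetD (pre ++ c :: z :: zs) ((pre.length : Int) + 1) d = z := by
  rw [show (pre.length : Int) + 1 = (((pre ++ [c]).length : Nat) : Int) by simp,
      show pre ++ c :: z :: zs = (pre ++ [c]) ++ z :: zs by simp]
  exact pvGetD_app0 (pre ++ [c]) z zs d

-- the inner while loop, entered at j = p.length + 1 on p ++ c :: (ys ++ v) with n = p.length + 1 + ys.length,
-- stops right after the leading chain of ys whose parity equals c's
lemma pvRunEndA_spec (ys : List Int) : ∀ (p : List Int) (c : Int) (v : List Int) (fuel : Nat) (n : Int),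
    n = (p.length : Int) + 1 + ys.length →
    ys.length ≤ fuel →
    pvRunEndA (p ++ c :: (ys ++ v)) n ((p.length : Int) + 1) fuel
      = (p.length : Int) + 1 + ((ys.takeWhile (fun y => PySem.Int.mod y 2 = PySem.Int.mod c 2)).length : Int) := by
  induction ys with
  | nil =>
    intro p c v fuel n hn hf
    cases fuel with
    | zero => simp [pvRunEndA]
    | succ f =>
      simp only [pvRunEndA, List.takeWhile_nil, List.length_nil]
      rw [if_neg]
      · simp
      · simp at hn; omega
  | cons y ys ih =>
    intro p c v fuel n hn hf
    cases fuel with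
    | zero => simp at hf
    | succ f =>
      simp only [List.cons_append] at *
      have hgj : PySem.List.pyGetD (p ++ c :: y :: (ys ++ v)) ((p.length : Int) + 1) 0 = y :=
        pvGetD_app1 p c y (ys ++ v) 0
      have hgj1 : PySem.List.pyGetD (p ++ c :: y :: (ys ++ v)) ((p.length : Int) + 1 - 1) 0 = c := by
        rw [show (p.length : Int) + 1 - 1 = (p.length : Int) by ring]
        exact pvGetD_app0 p c (y :: (ys ++ v)) 0
      simp only [pvRunEndA, hgj, hgj1, pvMod2] at *
      by_cases hpar : y % 2 = c % 2
      · rw [if_pos ⟨by simp at hn ⊢; omega, hpar⟩]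
        have hre : p ++ c :: y :: (ys ++ v) = (p ++ [c]) ++ y :: (ys ++ v) := by simp
        have hj1 : (p.length : Int) + 1 + 1 = (((p ++ [c]).length : Nat) : Int) + 1 := by simp
        rw [hre, hj1, ih (p ++ [c]) y v f n (by simp at hn ⊢; omega) (by simp at hf; omega)]
        have hpred : (fun z => decide (z % 2 = y % 2)) = (fun z => decide (z % 2 = c % 2)) := by
          funext z; rw [hpar]
        simp [hpar]
        omega
      · rw [if_neg (by rintro ⟨-, h⟩; exact hpar h)]
        simp [hpar]

-- reference characterisation of the result on the processed prefix: the concatenation of the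
-- maximal parity runs, each sorted descending (used only by the proofs)
def pvGroupsSpec (l : List Int) : List Int :=
  match l with
  | [] => []
  | x :: xs =>
    PySem.List.sorted (x :: xs.takeWhile (fun y => PySem.Int.mod y 2 = PySem.Int.mod x 2)) (fun z => z) true
      ++ pvGroupsSpec (xs.dropWhile (fun y => PySem.Int.mod y 2 = PySem.Int.mod x 2))
termination_by l.length
decreasing_by
  simpa using Nat.lt_succ_of_le (List.length_dropWhile_le _ _)

-- the outer while loop, started at i = p.length on p ++ (u ++ v) with n = p.length + u.length,
-- rewrites u into its concatenated descending-sorted parity groups and leaves p and v alone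
lemma pvOuterA_spec : ∀ (fuel : Nat) (u p v : List Int) (n : Int),
    n = (p.length : Int) + u.length →
    u.length ≤ fuel →
    pvOuterA (p ++ (u ++ v)) n (p.length : Int) fuel = p ++ pvGroupsSpec u ++ v := by
  intro fuel
  induction fuel with
  | zero =>
    intro u p v n hn hf
    have : u = [] := List.length_eq_zero_iff.mp (Nat.le_zero.mp hf)
    subst this
    simp [pvOuterA, pvGroupsSpec]
  | succ f ih =>
    intro u p v n hn hf
    cases u with
    | nil =>
      simp only [pvOuterA]
      rw [if_neg (by simp at hn; omega)]
      simp [pvGroupsSpec]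
    | cons x xs =>
      simp only [pvOuterA]
      rw [if_pos (by simp at hn ⊢; omega)]
      have hb : p ++ ((x :: xs) ++ v) = p ++ x :: (xs ++ v) := by simp
      set pred : Int → Bool := fun y => decide (PySem.Int.mod y 2 = PySem.Int.mod x 2) with hpred
      set w := xs.takeWhile pred with hw
      set d := xs.dropWhile pred with hd
      have hwd : w ++ d = xs := List.takeWhile_append_dropWhile
      have hwlen : w.length + d.length = xs.length := by
        rw [← List.length_append, hwd]
      have hrun : pvRunEndA (p ++ ((x :: xs) ++ v)) n ((p.length : Int) + 1) ((n - (p.length : Int)).toNat)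
          = (p.length : Int) + 1 + (w.length : Int) := by
        rw [hb]
        exact pvRunEndA_spec xs p x v _ n (by simp at hn ⊢; omega) (by simp at hn; omega)
      rw [hrun]
      -- the three slices: a[:i] = p, a[i:j] = x :: w, a[j:] = d ++ v
      have hs1 : PySem.List.slice (p ++ ((x :: xs) ++ v)) none (some (p.length : Int)) = p := by
        rw [PySem.List.slice_to_natCast, List.take_left]
      have hs2 : PySem.List.slice (p ++ ((x :: xs) ++ v)) (some (p.length : Int))
            (some ((p.length : Int) + 1 + (w.length : Int))) = x :: w := by
        rw [show (p.length : Int) + 1 + (w.length : Int) = (p.length : Int) + ((w.length + 1 : Nat) : Int) by push_cast; ring,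
            PySem.List.slice_natCast_add, List.drop_left]
        rw [show (x :: xs) ++ v = (x :: w) ++ (d ++ v) by simp [← hwd]]
        rw [show w.length + 1 = (x :: w).length by simp]
        exact List.take_left
      have hs3 : PySem.List.slice (p ++ ((x :: xs) ++ v)) (some ((p.length : Int) + 1 + (w.length : Int))) none
          = d ++ v := by
        rw [PySem.List.slice_from (xs := p ++ ((x :: xs) ++ v))
              (a := (p.length : Int) + 1 + (w.length : Int)) (by omega)]
        rw [show ((p.length : Int) + 1 + (w.length : Int)).toNat = (p ++ [x] ++ w).length by simp; omega]
        rw [show p ++ ((x :: xs) ++ v) = (p ++ [x] ++ w) ++ (d ++ v) by simp [← hwd]]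
        exact List.drop_left
      rw [hs1, hs2, hs3]
      -- recursive call handled by the induction hypothesis, with p grown by the sorted run
      have hlen_sorted : (PySem.List.sorted (x :: w) (fun z => z) true).length = w.length + 1 := by
        simp [PySem.List.length_sorted (x :: w) (fun z => z) true]
      have hstep : p ++ PySem.List.sorted (x :: w) (fun z => z) true ++ (d ++ v)
          = (p ++ PySem.List.sorted (x :: w) (fun z => z) true) ++ (d ++ v) := by simp
      rw [hstep,
          show (p.length : Int) + 1 + (w.length : Int)
            = (((p ++ PySem.List.sorted (x :: w) (fun z => z) true).length : Nat) : Int) by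
              simp [hlen_sorted]; ring,
          ih d _ v n (by simp [hlen_sorted] at hn ⊢; omega) (by simp at hf; omega)]
      have hgroups : pvGroupsSpec (x :: xs) = PySem.List.sorted (x :: w) (fun z => z) true ++ pvGroupsSpec d := by
        rw [pvGroupsSpec]
      rw [hgroups]
      simp

-- ===== lemmas about B's insertion pass =====

lemma pvInsertDesc_perm (g : List Int) (x : Int) : (pvInsertDesc g x).Perm (x :: g) := by
  induction g with
  | nil => simp [pvInsertDesc]
  | cons y ys ih =>
    simp only [pvInsertDesc]
    split_ifs with h
    · exact ((ih.cons y).trans (List.Perm.swap x y ys))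
    · exact List.Perm.refl _

lemma pvInsertDesc_mem {g : List Int} {x z : Int} (hz : z ∈ pvInsertDesc g x) :
    z = x ∨ z ∈ g := by
  have := (pvInsertDesc_perm g x).mem_iff.mp hz
  simpa using this

lemma pvInsertDesc_pairwise {g : List Int} (x : Int)
    (hg : g.Pairwise (fun a b => b ≤ a)) :
    (pvInsertDesc g x).Pairwise (fun a b => b ≤ a) := by
  induction g with
  | nil => simp [pvInsertDesc]
  | cons y ys ih =>
    rcases List.pairwise_cons.mp hg with ⟨hy, hys⟩
    simp only [pvInsertDesc]
    split_ifs with h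
    · refine List.pairwise_cons.mpr ⟨?_, ih hys⟩
      intro z hz
      rcases pvInsertDesc_mem hz with rfl | hzys
      · exact h
      · exact hy z hzys
    · refine List.pairwise_cons.mpr ⟨?_, hg⟩
      intro z hz
      rcases List.mem_cons.mp hz with rfl | hzys
      · omega
      · have := hy z hzys; omega

-- descending stable sort of Ints is the unique non-increasing rearrangement
lemma pvSortedDesc_unique {xs ys : List Int} (hp : ys.Perm xs)
    (hs : ys.Pairwise (fun a b => b ≤ a)) :
    PySem.List.sorted xs (fun z => z) true = ys := by
  have h1 : (PySem.List.sorted xs (fun z => z) true).Perm ys :=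
    (PySem.List.sorted_perm xs (fun z => z) true).trans hp.symm
  have h2 : (PySem.List.sorted xs (fun z => z) true).Pairwise (fun a b => b ≤ a) := by
    simpa using PySem.List.sorted_pairwise_rev xs (fun z => z)
  exact List.Perm.eq_of_pairwise (fun a b _ _ hab hba => le_antisymm hba hab) h2 hs h1

lemma pvInsertDesc_sorted (l : List Int) (x : Int) :
    pvInsertDesc (PySem.List.sorted l (fun z => z) true) x
      = PySem.List.sorted (x :: l) (fun z => z) true := by
  refine (pvSortedDesc_unique ?_ ?_).symm
  · exact (pvInsertDesc_perm _ x).trans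
      (((PySem.List.sorted_perm l (fun z => z) true)).cons x)
  · exact pvInsertDesc_pairwise x (by simpa using PySem.List.sorted_pairwise_rev l (fun z => z))

-- parity runs of a list (proof-side mirror of A's segmentation)
def pvRuns (l : List Int) : List (List Int) :=
  match l with
  | [] => []
  | x :: xs =>
    (x :: xs.takeWhile (fun y => PySem.Int.mod y 2 = PySem.Int.mod x 2))
      :: pvRuns (xs.dropWhile (fun y => PySem.Int.mod y 2 = PySem.Int.mod x 2))
termination_by l.length
decreasing_by
  simpa using Nat.lt_succ_of_le (List.length_dropWhile_le _ _)

-- B's foldr produces exactly the parity runs, each sorted descending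
lemma pvFoldrB_eq_runs (l : List Int) :
    l.foldr pvStepB [] = (pvRuns l).map (fun r => PySem.List.sorted r (fun z => z) true) := by
  induction hl : l.length using Nat.strong_induction_on generalizing l with
  | _ m ih =>
  cases l with
  | nil => simp [pvRuns]
  | cons x xs =>
    cases xs with
    | nil =>
      simp [pvRuns, pvStepB, PySem.List.sorted, PySem.List.insertBy]
    | cons y ys =>
      have hrec : (y :: ys).foldr pvStepB []
          = (pvRuns (y :: ys)).map (fun r => PySem.List.sorted r (fun z => z) true) := by
        subst hl
        exact ih (y :: ys).length (by simp) (y :: ys) rfl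
      have hfold : (x :: y :: ys).foldr pvStepB [] = pvStepB x ((y :: ys).foldr pvStepB []) := rfl
      rw [hfold, hrec]
      set py : Int → Bool := fun z => decide (PySem.Int.mod z 2 = PySem.Int.mod y 2) with hpy
      set w := ys.takeWhile py with hw
      rw [show pvRuns (y :: ys) = (y :: w) :: pvRuns (ys.dropWhile py) from by rw [pvRuns]]
      -- head of the sorted first run: some element of the run, hence has y's parity mod 2
      obtain ⟨m0, t0, hms⟩ : ∃ m0 t0, PySem.List.sorted (y :: w) (fun z => z) true = m0 :: t0 := by
        rcases hsn : PySem.List.sorted (y :: w) (fun z => z) true with _ | ⟨m0, t0⟩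
        · exact absurd ((PySem.List.sorted_eq_nil_iff _ _ _).mp hsn) (by simp)
        · exact ⟨m0, t0, rfl⟩
      have hm0mem : m0 ∈ (y :: w) := by
        have : m0 ∈ PySem.List.sorted (y :: w) (fun z => z) true := by rw [hms]; simp
        exact (PySem.List.mem_sorted _ _ _ _).mp this
      have hm0par : PySem.Int.mod m0 2 = PySem.Int.mod y 2 := by
        rcases List.mem_cons.mp hm0mem with rfl | hmw
        · rfl
        · have := List.mem_takeWhile_imp (hw ▸ hmw)
          simpa [hpy] using this
      simp only [List.map_cons, pvStepB, hms]
      have hget : PySem.List.pyGetD (m0 :: t0) 0 0 = m0 := by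
        simp [pysem]
      rw [hget]
      by_cases hpar : PySem.Int.mod x 2 = PySem.Int.mod y 2
      · rw [if_pos (by rw [hm0par, hpar])]
        -- same parity: x joins the first run; takeWhile/dropWhile predicates for x and y agree
        have hpar' : x % 2 = y % 2 := by simpa [pvMod2] using hpar
        have hpeq : (fun z => decide (PySem.Int.mod z 2 = PySem.Int.mod x 2)) = py := by
          funext z; simp [hpy, hpar']
        rw [show pvRuns (x :: y :: ys)
              = (x :: (y :: ys).takeWhile (fun z => decide (PySem.Int.mod z 2 = PySem.Int.mod x 2)))
                :: pvRuns ((y :: ys).dropWhile (fun z => decide (PySem.Int.mod z 2 = PySem.Int.mod x 2)))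
            from by rw [pvRuns]]
        rw [hpeq]
        have htw : (y :: ys).takeWhile py = y :: w := by
          rw [List.takeWhile_cons, if_pos (by simp [hpy])]
        have hdw : (y :: ys).dropWhile py = ys.dropWhile py := by
          rw [List.dropWhile_cons, if_pos (by simp [hpy])]
        rw [htw, hdw, List.map_cons, ← hms, pvInsertDesc_sorted]
      · rw [if_neg (by rw [hm0par]; exact fun h => hpar h.symm)]
        -- different parity: x opens its own singleton run
        have hpar' : ¬ (x % 2 = y % 2) := fun h => hpar (by simpa [pvMod2] using h)
        rw [show pvRuns (x :: y :: ys)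
              = (x :: (y :: ys).takeWhile (fun z => decide (PySem.Int.mod z 2 = PySem.Int.mod x 2)))
                :: pvRuns ((y :: ys).dropWhile (fun z => decide (PySem.Int.mod z 2 = PySem.Int.mod x 2)))
            from by rw [pvRuns]]
        have htw : (y :: ys).takeWhile (fun z => decide (PySem.Int.mod z 2 = PySem.Int.mod x 2)) = [] := by
          rw [List.takeWhile_cons, if_neg (by simp; exact fun h => hpar' (by simpa [pvMod2] using h.symm))]
        have hdw : (y :: ys).dropWhile (fun z => decide (PySem.Int.mod z 2 = PySem.Int.mod x 2)) = y :: ys := by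
          rw [List.dropWhile_cons, if_neg (by simp; exact fun h => hpar' (by simpa [pvMod2] using h.symm))]
        rw [htw, hdw]
        rw [show pvRuns (y :: ys) = (y :: w) :: pvRuns (ys.dropWhile py) from by rw [pvRuns]]
        simp only [List.map_cons, hms]
        simp [PySem.List.sorted, PySem.List.insertBy]

-- flattening B's groups gives the reference concatenation of sorted runs
lemma pvFlatten_eq_groupsSpec (l : List Int) :
    (l.foldr pvStepB []).flatten = pvGroupsSpec l := by
  rw [pvFoldrB_eq_runs]
  induction hl : l.length using Nat.strong_induction_on generalizing l with
  | _ m ih =>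
  cases l with
  | nil => simp [pvRuns, pvGroupsSpec]
  | cons x xs =>
    rw [show pvRuns (x :: xs)
          = (x :: xs.takeWhile (fun y => PySem.Int.mod y 2 = PySem.Int.mod x 2))
            :: pvRuns (xs.dropWhile (fun y => PySem.Int.mod y 2 = PySem.Int.mod x 2))
        from by rw [pvRuns],
        show pvGroupsSpec (x :: xs)
          = PySem.List.sorted (x :: xs.takeWhile (fun y => PySem.Int.mod y 2 = PySem.Int.mod x 2)) (fun z => z) true
            ++ pvGroupsSpec (xs.dropWhile (fun y => PySem.Int.mod y 2 = PySem.Int.mod x 2))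
        from by rw [pvGroupsSpec]]
    subst hl
    rw [List.map_cons, List.flatten_cons,
        ih (xs.dropWhile (fun y => PySem.Int.mod y 2 = PySem.Int.mod x 2)).length
          (by simpa using Nat.lt_succ_of_le (List.length_dropWhile_le _ _)) _ rfl]

-- ===== VERDICT (by name: the statement is the Claim_ definition above) =====
theorem lexicographicallyLargest_spec : Claim_equal_lexicographicallyLargest := by
  intro a n _ hpre
  unfold Spec_lexicographicallyLargest
  rcases hpre with hle | ⟨rfl, rfl⟩
  · by_cases hpos : 0 < n
    · have hsplit : a = a.take n.toNat ++ (a.drop n.toNat ++ []) := by simp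
      have hlen : (a.take n.toNat).length = n.toNat := by
        simp [List.length_take]; omega
      unfold lexicographicallyLargest lexicographicallyLargest_alt
      rw [show max n 0 = n by omega]
      calc pvOuterA a n 0 n.toNat
          = pvOuterA (([] : List Int) ++ (a.take n.toNat ++ (a.drop n.toNat ++ [])))
              n (((([] : List Int)).length : Nat) : Int) n.toNat := by
            rw [← hsplit]; norm_num
        _ = ([] : List Int) ++ pvGroupsSpec (a.take n.toNat) ++ (a.drop n.toNat ++ []) := by
            exact pvOuterA_spec n.toNat (a.take n.toNat) [] (a.drop n.toNat ++ []) n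
              (by simp [hlen]; omega) (by omega)
        _ = ((PySem.List.slice a none (some n)).foldr pvStepB []).flatten
              ++ PySem.List.slice a (some n) := by
            rw [pvFlatten_eq_groupsSpec, PySem.List.slice_to a (by omega),
              PySem.List.slice_from a (by omega)]
            simp
    · unfold lexicographicallyLargest lexicographicallyLargest_alt
      rw [show max n 0 = 0 by omega, show n.toNat = 0 by omega]
      simp [pvOuterA, PySem.List.slice_to a (le_refl (0:Int)),
        PySem.List.slice_from a (le_refl (0:Int))]
  · simp [lexicographicallyLargest, lexicographicallyLargest_alt, pvOuterA, pvRunEndA,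
      PySem.List.slice, PySem.List.clampIdx, PySem.List.sorted]
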